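-- pv_equiv track=rewrite | github.com/francis-gretz/genepy | consecutive-sum.py | find_consecutive_sum
-- ===== SOURCE A (Python) =====
-- def find_consecutive_sum(n):
--     adjacent_numbers = 3
--
--     if n == 0:
--         numbers = [-1, 0, 1]
--         return tuple(numbers)
--
--     for i in range(n - adjacent_numbers + 1):
--         sum = 0
--
--         numbers = []
--         for j in range(adjacent_numbers):
--             number = i + j
--             numbers.append(number)
--             sum += number
--
--         if sum == n:
--             return tuple(numbers)
--
--     return None
-- ===== SOURCE B (Python) =====
-- def find_consecutive_sum(n):
--     # O(1) closed form: three consecutive ints starting at i sum to 3*i+3.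
--     if n == 0:
--         return (-1, 0, 1)
--     if n >= 3 and n % 3 == 0:
--         i = n // 3 - 1
--         return (i, i + 1, i + 2)
--     return None
-- ===== Notes on version B (the rewrite author's own statement) =====
-- stated objective: faster
-- what changed: Replaced A's linear scan over range(n-2) (with an inner loop rebuilding the triple each time) by the O(1) closed form i = n//3 - 1 with a divisibility-and-range check.
import Mathlib
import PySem

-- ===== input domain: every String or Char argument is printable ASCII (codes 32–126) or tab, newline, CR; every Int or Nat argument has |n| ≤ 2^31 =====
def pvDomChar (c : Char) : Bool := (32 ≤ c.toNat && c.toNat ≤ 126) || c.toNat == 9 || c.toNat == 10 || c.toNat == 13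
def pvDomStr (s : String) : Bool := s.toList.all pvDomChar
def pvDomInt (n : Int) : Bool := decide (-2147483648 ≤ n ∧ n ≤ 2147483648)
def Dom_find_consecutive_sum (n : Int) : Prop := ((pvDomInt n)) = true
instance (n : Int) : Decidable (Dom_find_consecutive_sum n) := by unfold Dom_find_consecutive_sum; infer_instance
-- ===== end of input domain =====

-- B replaces A's linear scan by the O(1) closed form i = n//3 - 1 with a divisibility/range check (objective: faster).

-- ===== PORT A =====
-- inner 'for j in range(3)' loop: state (numbers, sum)
def pvInnerA (i : Int) : List Int × Int :=
  (PySem.List.pyRange 0 3 1).foldl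
    (fun (st : List Int × Int) j =>
      let number := i + j
      (st.1 ++ [number], st.2 + number))
    ([], 0)

def find_consecutive_sum (n : Int) : Option (List Int) :=
  if n = 0 then some [-1, 0, 1]
  else
    -- 'for i in range(n - 3 + 1): … if sum == n: return tuple(numbers)' → first i whose body returns
    (PySem.List.pyRange 0 (n - 3 + 1) 1).findSome? (fun i =>
      let st := pvInnerA i
      if st.2 = n then some st.1 else none)

-- ===== PORT B =====
def find_consecutive_sum_alt (n : Int) : Option (List Int) :=
  if n = 0 then some [-1, 0, 1]
  else if 3 ≤ n ∧ PySem.Int.mod n 3 = 0 then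
    let i := PySem.Int.floordiv n 3 - 1
    some [i, i + 1, i + 2]
  else none

-- ===== PRECONDITION & SPEC =====
def Spec_find_consecutive_sum (n : Int) (out : Option (List Int)) : Prop := out = find_consecutive_sum_alt n
instance (n : Int) (out : Option (List Int)) : Decidable (Spec_find_consecutive_sum n out) := by unfold Spec_find_consecutive_sum; infer_instance

-- ===== CLAIM (what is proved, stated in full; the proofs are below) =====
def Claim_equal_find_consecutive_sum : Prop := ∀ (n : Int), Dom_find_consecutive_sum n → Spec_find_consecutive_sum n (find_consecutive_sum n)

-- ===== LEMMAS AND PROOFS =====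

theorem pvInnerA_eq (i : Int) : pvInnerA i = ([i, i + 1, i + 2], 3 * i + 3) := by
  have h : PySem.List.pyRange 0 3 1 = [0, 1, 2] := by decide
  simp [pvInnerA, h, List.foldl]
  ring

theorem pvBody_eq (n i : Int) :
    (let st := pvInnerA i; if st.2 = n then some st.1 else none)
      = if 3 * i + 3 = n then some [i, i + 1, i + 2] else none := by
  rw [pvInnerA_eq]

theorem pvScan_none (n : Int) (h : ¬ (3 ≤ n ∧ n % 3 = 0)) :
    (PySem.List.pyRange 0 (n - 3 + 1) 1).findSome? (fun i =>
      let st := pvInnerA i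
      if st.2 = n then some st.1 else none) = none := by
  rw [List.findSome?_eq_none_iff]
  intro i hi
  rw [PySem.List.mem_pyRange_one] at hi
  rw [pvBody_eq]
  have : ¬ (3 * i + 3 = n) := by omega
  simp [this]

theorem pvScan_some (n : Int) (h3 : 3 ≤ n) (hm : n % 3 = 0) :
    (PySem.List.pyRange 0 (n - 3 + 1) 1).findSome? (fun i =>
      let st := pvInnerA i
      if st.2 = n then some st.1 else none)
      = some [n / 3 - 1, n / 3 - 1 + 1, n / 3 - 1 + 2] := by
  set i₀ : Int := n / 3 - 1 with hi₀
  have hb1 : (0 : Int) ≤ i₀ := by omega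
  have hb2 : i₀ < n - 3 + 1 := by omega
  have hsplit := PySem.List.pyRange_one_append 0 i₀ (n - 3 + 1) hb1 (by omega)
  rw [hsplit, List.findSome?_append]
  have hleft : (PySem.List.pyRange 0 i₀ 1).findSome? (fun i =>
      let st := pvInnerA i
      if st.2 = n then some st.1 else none) = none := by
    rw [List.findSome?_eq_none_iff]
    intro i hi
    rw [PySem.List.mem_pyRange_one] at hi
    rw [pvBody_eq]
    have : ¬ (3 * i + 3 = n) := by omega
    simp [this]
  rw [hleft]
  rw [PySem.List.pyRange_one_cons hb2]
  simp only [List.findSome?_cons]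
  rw [pvBody_eq]
  have : 3 * i₀ + 3 = n := by omega
  simp [this]

-- ===== VERDICT (by name: the statement is the Claim_ definition above) =====
theorem find_consecutive_sum_spec : Claim_equal_find_consecutive_sum := by
  intro n _
  unfold Spec_find_consecutive_sum find_consecutive_sum find_consecutive_sum_alt
  by_cases h0 : n = 0
  · simp [h0]
  · simp only [h0, if_false]
    rw [PySem.Int.mod_eq_emod_of_pos (a := n) (by norm_num),
        PySem.Int.floordiv_eq_ediv_of_pos (a := n) (by norm_num)]
    by_cases hc : 3 ≤ n ∧ n % 3 = 0
    · rw [pvScan_some n hc.1 hc.2, if_pos hc]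
    · rw [pvScan_none n hc, if_neg hc]
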